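-- pv_equiv track=rewrite | github.com/take-works-tech/arc-agi2-arc2025 | src/hybrid_system/inference/object_matching/similarity_calculator.py | _transform_pixels
-- ===== SOURCE A (Python) =====
-- from typing import Dict, Any, Optional, Tuple
--
-- def _transform_pixels(
--     pixels: set, rotation: int, flip: Optional[str]
-- ) -> set:
--     """
--     ピクセル座標を回転・反転変換
--
--     Args:
--         pixels: ピクセル座標のセット
--         rotation: 回転角度（0, 90, 180, 270）
--         flip: 反転タイプ（None, "X", "Y")
--
--     Returns:
--         変換後のピクセル座標のセット
--     """
--     transformed = set()
--
--     for y, x in pixels: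
--         # 回転
--         if rotation == 90:
--             new_y, new_x = x, -y
--         elif rotation == 180:
--             new_y, new_x = -y, -x
--         elif rotation == 270:
--             new_y, new_x = -x, y
--         else:  # rotation == 0
--             new_y, new_x = y, x
--
--         # 反転
--         if flip == "X":
--             new_y = -new_y
--         elif flip == "Y":
--             new_x = -new_x
--
--         transformed.add((new_y, new_x))
--
--     return transformed
-- ===== SOURCE B (Python) =====
-- from typing import Optional
--
-- def _transform_pixels(pixels: set, rotation: int, flip: Optional[str]) -> set:
--     # Staged passes: apply a single quarter-turn primitive (y,x) -> (x,-y)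
--     # k times (k = number of 90-degree steps, 0 for any unrecognised rotation),
--     # then one flip pass, deduplicating into a set only at the end.
--     pts = list(pixels)
--     k = {90: 1, 180: 2, 270: 3}.get(rotation, 0)
--     for _ in range(k):
--         pts = [(x, -y) for (y, x) in pts]
--     if flip == "X":
--         pts = [(-y, x) for (y, x) in pts]
--     elif flip == "Y":
--         pts = [(y, -x) for (y, x) in pts]
--     return set(pts)
-- ===== Notes on version B (the rewrite author's own statement) =====
-- stated objective: alternative
-- what changed: Replaces A's per-pixel four-way rotation dispatch with staged whole-list passes: one quarter-turn primitive applied k times (k from the rotation), then a separate flip pass, deduplicating into a set only once at the end.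
import Mathlib
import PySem

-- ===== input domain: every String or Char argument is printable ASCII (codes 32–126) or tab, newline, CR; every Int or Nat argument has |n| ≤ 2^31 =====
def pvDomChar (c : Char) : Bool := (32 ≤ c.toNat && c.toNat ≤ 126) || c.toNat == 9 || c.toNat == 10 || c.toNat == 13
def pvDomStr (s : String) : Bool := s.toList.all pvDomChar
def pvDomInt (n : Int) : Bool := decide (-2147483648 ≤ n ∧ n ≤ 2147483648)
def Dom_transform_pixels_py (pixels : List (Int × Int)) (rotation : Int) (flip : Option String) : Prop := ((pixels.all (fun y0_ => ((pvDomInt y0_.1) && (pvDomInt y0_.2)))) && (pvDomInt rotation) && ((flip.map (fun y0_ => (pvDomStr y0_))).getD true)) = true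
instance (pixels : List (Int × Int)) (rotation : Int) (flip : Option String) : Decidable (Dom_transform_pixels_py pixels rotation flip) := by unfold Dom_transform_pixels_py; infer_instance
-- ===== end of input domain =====

-- B applies one quarter-turn primitive k times as staged whole-list passes, then a flip pass,
-- deduplicating once at the end; objective: alternative decomposition (same cost).

-- ===== PORT A =====
def transform_pixels_py (pixels : List (Int × Int)) (rotation : Int) (flip : Option String) : List (Int × Int) :=
  pixels.foldl (fun transformed yx =>
    let p :=
      if rotation = 90 then (yx.2, -yx.1)
      else if rotation = 180 then (-yx.1, -yx.2)
      else if rotation = 270 then (-yx.2, yx.1)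
      else (yx.1, yx.2)
    let p2 :=
      if flip = some "X" then (-p.1, p.2)
      else if flip = some "Y" then (p.1, -p.2)
      else p
    PySem.Set.add transformed p2) []

-- ===== PORT B =====
-- one quarter-turn pass over the whole list: (y, x) -> (x, -y)
def pvQuarter (pts : List (Int × Int)) : List (Int × Int) :=
  pts.map (fun yx => (yx.2, -yx.1))

def transform_pixels_py_alt (pixels : List (Int × Int)) (rotation : Int) (flip : Option String) : List (Int × Int) :=
  let k : Nat := if rotation = 90 then 1 else if rotation = 180 then 2 else if rotation = 270 then 3 else 0
  let pts := pvQuarter^[k] pixels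
  let pts2 :=
    if flip = some "X" then pts.map (fun yx => (-yx.1, yx.2))
    else if flip = some "Y" then pts.map (fun yx => (yx.1, -yx.2))
    else pts
  PySem.Set.ofList pts2

-- ===== PRECONDITION & SPEC =====
def Spec_transform_pixels_py (pixels : List (Int × Int)) (rotation : Int) (flip : Option String) (out : List (Int × Int)) : Prop := out = transform_pixels_py_alt pixels rotation flip
instance (pixels : List (Int × Int)) (rotation : Int) (flip : Option String) (out : List (Int × Int)) : Decidable (Spec_transform_pixels_py pixels rotation flip out) := by unfold Spec_transform_pixels_py; infer_instance

-- ===== CLAIM =====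
def Claim_equal_transform_pixels_py : Prop := ∀ (pixels : List (Int × Int)) (rotation : Int) (flip : Option String), Dom_transform_pixels_py pixels rotation flip → Spec_transform_pixels_py pixels rotation flip (transform_pixels_py pixels rotation flip)

-- ===== LEMMAS AND PROOFS =====

-- A is the set-fold of its per-pixel transform: rewrite it as ofList of a single map.
theorem pv_A_eq_ofList_map (pixels : List (Int × Int)) (rotation : Int) (flip : Option String) :
    transform_pixels_py pixels rotation flip =
    PySem.Set.ofList (pixels.map (fun yx =>
      let p :=
        if rotation = 90 then (yx.2, -yx.1)
        else if rotation = 180 then (-yx.1, -yx.2)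
        else if rotation = 270 then (-yx.2, yx.1)
        else (yx.1, yx.2)
      if flip = some "X" then (-p.1, p.2)
      else if flip = some "Y" then (p.1, -p.2)
      else p)) := by
  unfold transform_pixels_py
  rw [PySem.Set.ofList_eq_foldl, List.foldl_map]

-- ===== VERDICT =====
theorem transform_pixels_py_spec : Claim_equal_transform_pixels_py := by
  intro pixels rotation flip _
  unfold Spec_transform_pixels_py transform_pixels_py_alt
  rw [pv_A_eq_ofList_map]
  by_cases h90 : rotation = 90 <;> by_cases h180 : rotation = 180 <;>
    by_cases h270 : rotation = 270 <;>
  by_cases hX : flip = some "X" <;> by_cases hY : flip = some "Y" <;>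
    simp_all [pvQuarter, Function.iterate_succ, Function.comp_def, List.map_map]
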